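-- pv_equiv track=rewrite | github.com/TrissElan/crosspoint-reader-cjk-minimized | lib/EpdFont/scripts/generate_pretendard_font.py | codepoints_to_intervals
-- ===== SOURCE A (Python) =====
-- def codepoints_to_intervals(codepoints):
--     """Convert sorted codepoint list to "0xSTART,0xEND" interval strings."""
--     if not codepoints:
--         return []
--     intervals = []
--     start = codepoints[0]
--     end = codepoints[0]
--     for cp in codepoints[1:]:
--         if cp == end + 1:
--             end = cp
--         else:
--             intervals.append(f"0x{start:04X},0x{end:04X}")
--             start = cp
--             end = cp
--     intervals.append(f"0x{start:04X},0x{end:04X}")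
--     return intervals
-- ===== SOURCE B (Python) =====
-- def codepoints_to_intervals(codepoints):
--     """Convert sorted codepoint list to "0xSTART,0xEND" interval strings."""
--     if not codepoints:
--         return []
--     # breaks: adjacent pairs (a, b) where a new interval begins at b
--     breaks = [(a, b) for a, b in zip(codepoints, codepoints[1:]) if b != a + 1]
--     starts = [codepoints[0]] + [b for _, b in breaks]
--     ends = [a for a, _ in breaks] + [codepoints[-1]]
--     return [f"0x{s:04X},0x{e:04X}" for s, e in zip(starts, ends)]
-- ===== Notes on version B (the rewrite author's own statement) =====
-- stated objective: alternative
-- what changed: B replaces A's stateful start/end accumulator loop by a declarative decomposition: it collects the break pairs (a,b) with b != a+1 from zip(codepoints, codepoints[1:]), derives the starts and ends lists from them, and zips those into the interval strings.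
import Mathlib
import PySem

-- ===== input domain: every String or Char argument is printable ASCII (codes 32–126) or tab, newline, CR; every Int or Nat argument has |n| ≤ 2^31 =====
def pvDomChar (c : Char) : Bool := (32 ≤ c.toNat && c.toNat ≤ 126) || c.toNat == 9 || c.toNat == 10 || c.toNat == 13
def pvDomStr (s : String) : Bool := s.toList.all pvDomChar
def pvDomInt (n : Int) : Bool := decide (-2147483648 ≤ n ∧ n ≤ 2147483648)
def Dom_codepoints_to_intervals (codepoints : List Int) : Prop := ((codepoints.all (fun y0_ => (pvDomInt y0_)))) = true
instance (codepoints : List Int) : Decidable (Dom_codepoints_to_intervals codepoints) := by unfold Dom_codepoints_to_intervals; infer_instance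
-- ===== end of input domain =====

-- B replaces A's stateful start/end accumulator loop by a break-pair/zip decomposition (alternative, same cost).


-- shared formatting helpers: exact port of Python's f"0x{n:04X}" (uppercase hex,
-- zero-padded to width 4 with the sign kept in front), used by both ports since
-- both Pythons use the identical f-string.
def hexDigitChar (d : Nat) : Char := if d < 10 then Char.ofNat (48 + d) else Char.ofNat (55 + d)

def natHexChars (n : Nat) : List Char :=
  if n < 16 then [hexDigitChar n]
  else natHexChars (n / 16) ++ [hexDigitChar (n % 16)]
  decreasing_by exact Nat.div_lt_self (by omega) (by omega)

def fmt04X (n : Int) : String :=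
  String.ofList (PySem.Chars.zfill (if n < 0 then '-' :: natHexChars n.natAbs else natHexChars n.natAbs) 4)

def fmtIv (s e : Int) : String := "0x" ++ fmt04X s ++ ",0x" ++ fmt04X e

-- ===== PORT A =====
def codepoints_to_intervals (codepoints : List Int) : List String :=
  match codepoints with
  | [] => []
  | c :: rest =>
    -- intervals = [], start = end = codepoints[0]; loop over codepoints[1:]
    let st := rest.foldl (fun (st : List String × Int × Int) cp =>
        if cp == st.2.2 + 1 then (st.1, st.2.1, cp)
        else (st.1 ++ [fmtIv st.2.1 st.2.2], cp, cp)) ([], c, c)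
    st.1 ++ [fmtIv st.2.1 st.2.2]

-- ===== PORT B =====
def codepoints_to_intervals_alt (codepoints : List Int) : List String :=
  match codepoints with
  | [] => []
  | c :: rest =>
    let breaks := ((c :: rest).zip rest).filter (fun ab => ab.2 != ab.1 + 1)
    let starts := c :: breaks.map (·.2)
    let ends := breaks.map (·.1) ++ [rest.getLastD c]
    (starts.zip ends).map (fun se => fmtIv se.1 se.2)

-- ===== PRECONDITION & SPEC =====
def Spec_codepoints_to_intervals (codepoints : List Int) (out : List String) : Prop := out = codepoints_to_intervals_alt codepoints
instance (codepoints : List Int) (out : List String) : Decidable (Spec_codepoints_to_intervals codepoints out) := by unfold Spec_codepoints_to_intervals; infer_instance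

-- ===== CLAIM (what is proved, stated in full; the proofs are below) =====
def Claim_equal_codepoints_to_intervals : Prop := ∀ (codepoints : List Int), Dom_codepoints_to_intervals codepoints → Spec_codepoints_to_intervals codepoints (codepoints_to_intervals codepoints)

-- ===== LEMMAS AND PROOFS =====

-- common reference recursion: intervals of `rest` given current interval [s, e]
def specF : Int → Int → List Int → List String
  | s, e, [] => [fmtIv s e]
  | s, e, cp :: rest => if cp = e + 1 then specF s cp rest else fmtIv s e :: specF cp cp rest

-- A's loop, with any accumulated intervals `ivs`, computes `ivs ++ specF s e rest`
lemma foldlA_eq_specF (rest : List Int) : ∀ (ivs : List String) (s e : Int),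
    (let st := rest.foldl (fun (st : List String × Int × Int) cp =>
        if cp == st.2.2 + 1 then (st.1, st.2.1, cp)
        else (st.1 ++ [fmtIv st.2.1 st.2.2], cp, cp)) (ivs, s, e)
     st.1 ++ [fmtIv st.2.1 st.2.2]) = ivs ++ specF s e rest := by
  induction rest with
  | nil => intro ivs s e; simp [specF]
  | cons cp rest ih =>
    intro ivs s e
    by_cases h : cp = e + 1
    · subst h
      simpa [List.foldl, specF] using ih ivs s (e + 1)
    · simpa [List.foldl, specF, h] using ih (ivs ++ [fmtIv s e]) cp cp

-- B's zip/break computation on (e :: rest), with displayed start s, is specF s e rest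
lemma zipB_eq_specF (rest : List Int) : ∀ (s e : Int),
    (((((e :: rest).zip rest).filter (fun ab => ab.2 != ab.1 + 1)).map (·.2) |>.cons s).zip
        ((((e :: rest).zip rest).filter (fun ab => ab.2 != ab.1 + 1)).map (·.1)
          ++ [rest.getLastD e])).map (fun se => fmtIv se.1 se.2) = specF s e rest := by
  induction rest with
  | nil => intro s e; simp [specF]
  | cons d rs ih =>
    intro s e
    rw [List.getLastD_cons]
    by_cases h : d = e + 1
    · subst h
      simpa [specF] using ih s (e + 1)
    · simpa [specF, h] using ih d d

-- ===== VERDICT (by name: the statement is the Claim_ definition above) =====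
theorem codepoints_to_intervals_spec : Claim_equal_codepoints_to_intervals := by
  intro codepoints _
  unfold Spec_codepoints_to_intervals codepoints_to_intervals codepoints_to_intervals_alt
  cases codepoints with
  | nil => rfl
  | cons c rest =>
    simpa using (foldlA_eq_specF rest [] c c).trans (zipB_eq_specF rest c c).symm
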